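-- pv_equiv track=rewrite | github.com/BorisPolonsky/dify-helm | ci/scripts/check_unused_values.py | is_value_referenced
-- ===== SOURCE A (Python) =====
-- def is_value_referenced(key, references):
--     """Check if a value key is referenced in the templates"""
--     # Direct reference
--     if key in references:
--         return True
--
--     # Partial path references
--     key_parts = key.split('.')
--     for i in range(len(key_parts)):
--         partial_key = '.'.join(key_parts[:i+1])
--         if partial_key in references:
--             return True
--
--     # Check if any reference starts with this key path
--     for ref in references:
--         if ref.startswith(key + '.'):
--             return True
--
--     # Special case: check if there are generic references to parent structures
--     # For example, if we check "weaviate.image" but templates reference the whole "weaviate" object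
--     for ref in references:
--         if key.startswith(ref + '.'):
--             return True
--
--     return False
-- ===== SOURCE B (Python) =====
-- def is_value_referenced(key, references):
--     """Check if a value key is referenced in the templates"""
--     # One pass: a reference counts iff it equals the key, is a dotted
--     # ancestor of the key, or is a dotted descendant of the key.
--     dotted = key + '.'
--     return any(ref == key or key.startswith(ref + '.') or ref.startswith(dotted)
--                for ref in references)
-- ===== Notes on version B (the rewrite author's own statement) =====
-- stated objective: simpler
-- what changed: A's four sequential scans (direct membership, a split/join loop over every dotted prefix of the key, and two startswith scans) are replaced by a single pass that tests each reference once for equality, dotted-ancestor or dotted-descendant of the key; the split/join prefix loop disappears entirely.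
import Mathlib
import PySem

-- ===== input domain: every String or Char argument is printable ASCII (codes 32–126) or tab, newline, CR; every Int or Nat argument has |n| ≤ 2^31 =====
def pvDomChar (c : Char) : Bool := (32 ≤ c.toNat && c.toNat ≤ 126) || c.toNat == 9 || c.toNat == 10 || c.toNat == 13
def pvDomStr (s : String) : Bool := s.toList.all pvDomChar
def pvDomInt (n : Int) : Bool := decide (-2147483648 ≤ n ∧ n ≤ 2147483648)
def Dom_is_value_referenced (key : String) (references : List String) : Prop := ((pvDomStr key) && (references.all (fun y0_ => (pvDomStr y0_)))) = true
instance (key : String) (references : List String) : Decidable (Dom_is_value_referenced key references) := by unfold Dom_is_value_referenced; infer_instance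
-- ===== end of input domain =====

-- B replaces A's four sequential scans (direct hit, split/join partial-path scan,
-- child scan, parent scan) by ONE pass testing each reference directly (simpler).

-- ===== PORT A =====
-- literal transliteration of A: direct membership, then the split/join partial-key
-- loop, then the two startswith scans (an early 'return True' in a Python for-loop
-- is List.any), working on List Char as PySem prescribes.
def is_value_referenced (key : String) (references : List String) : Bool :=
  let k := key.toList
  let refs := references.map String.toList
  -- Direct reference
  if refs.contains k then true
  else
    -- Partial path references
    let key_parts := PySem.Chars.splitOn k ['.']
    if (List.range key_parts.length).any
        (fun i => refs.contains (PySem.Chars.join ['.'] (key_parts.take (i + 1)))) then true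
    -- Check if any reference starts with this key path
    else if refs.any (fun ref => PySem.Chars.startswith ref (k ++ ['.'])) then true
    -- Special case: generic references to parent structures
    else if refs.any (fun ref => PySem.Chars.startswith k (ref ++ ['.'])) then true
    else false

-- ===== PORT B =====
-- literal transliteration of Source B: one any-pass over references.
def is_value_referenced_alt (key : String) (references : List String) : Bool :=
  let k := key.toList
  let dotted := k ++ ['.']
  references.any (fun ref =>
    ref.toList == k
      || PySem.Chars.startswith k (ref.toList ++ ['.'])
      || PySem.Chars.startswith ref.toList dotted)

-- ===== PRECONDITION & SPEC =====
def Spec_is_value_referenced (key : String) (references : List String) (out : Bool) : Prop := out = is_value_referenced_alt key references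
instance (key : String) (references : List String) (out : Bool) : Decidable (Spec_is_value_referenced key references out) := by unfold Spec_is_value_referenced; infer_instance

-- ===== CLAIM (what is proved, stated in full; the proofs are below) =====
def Claim_equal_is_value_referenced : Prop := ∀ (key : String) (references : List String), Dom_is_value_referenced key references → Spec_is_value_referenced key references (is_value_referenced key references)

-- ===== LEMMAS AND PROOFS =====

-- join over a concatenation of two nonempty lists of parts glues them with one separator
theorem join_append (sep : List Char) (xs ys : List (List Char)) (hx : xs ≠ []) (hy : ys ≠ []) :
    PySem.Chars.join sep (xs ++ ys)
      = PySem.Chars.join sep xs ++ sep ++ PySem.Chars.join sep ys := by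
  induction xs with
  | nil => exact absurd rfl hx
  | cons a xs ih =>
    cases xs with
    | nil =>
      obtain ⟨y, ys', rfl⟩ := List.exists_cons_of_ne_nil hy
      simp [PySem.Chars.join_singleton, PySem.Chars.join_cons_cons]
    | cons b xt =>
      simp only [List.cons_append] at *
      rw [PySem.Chars.join_cons_cons, ih (by simp), PySem.Chars.join_cons_cons]
      simp

-- invariant of splitOn.go: joining the produced parts restores accumulators and rest
theorem join_splitOn_go (sep : List Char) (fuel : Nat) :
    ∀ (l cur : List Char) (acc : List (List Char)),
      PySem.Chars.join sep (PySem.Chars.splitOn.go sep fuel l cur acc)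
        = PySem.Chars.join sep (acc.reverse ++ [cur.reverse ++ l]) := by
  induction fuel with
  | zero => intro l cur acc; simp [PySem.Chars.splitOn.go]
  | succ fuel ih =>
    intro l cur acc
    cases l with
    | nil => simp [PySem.Chars.splitOn.go]
    | cons c rest =>
      by_cases hp : sep.isPrefixOf (c :: rest) = true
      · obtain ⟨t, ht⟩ := List.isPrefixOf_iff_prefix.mp hp
        simp only [PySem.Chars.splitOn.go, hp, if_pos]
        rw [ih]
        have hdrop : List.drop sep.length (c :: rest) = t := by
          rw [← ht]; simp
        rw [hdrop]
        simp only [List.reverse_cons, List.reverse_nil, List.nil_append]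
        by_cases hacc : acc.reverse = []
        · rw [hacc]
          simp only [List.nil_append]
          rw [PySem.Chars.join_singleton,
              show ([cur.reverse] : List (List Char)) ++ [t] = [cur.reverse, t] by rfl,
              PySem.Chars.join_cons_cons, PySem.Chars.join_singleton, ← ht]
          simp
        · rw [List.append_assoc,
              join_append sep acc.reverse ([cur.reverse] ++ [t]) hacc (by simp),
              join_append sep acc.reverse [cur.reverse ++ (c :: rest)] hacc (by simp),
              show ([cur.reverse] : List (List Char)) ++ [t] = [cur.reverse, t] by rfl,
              PySem.Chars.join_cons_cons, PySem.Chars.join_singleton,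
              PySem.Chars.join_singleton, ← ht]
          simp
      · simp only [PySem.Chars.splitOn.go]
        rw [if_neg (by simp_all)]
        rw [ih rest (c :: cur) acc]
        simp

-- full re-join: '.'.join(key.split('.')) == key
theorem join_splitOn (s sep : List Char) :
    PySem.Chars.join sep (PySem.Chars.splitOn s sep) = s := by
  unfold PySem.Chars.splitOn
  rw [join_splitOn_go sep _ s [] []]
  simp [PySem.Chars.join_singleton]

-- splitOn.go never returns the empty list
theorem splitOn_go_ne_nil (sep : List Char) (fuel : Nat) :
    ∀ (l cur : List Char) (acc : List (List Char)),
      PySem.Chars.splitOn.go sep fuel l cur acc ≠ [] := by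
  induction fuel with
  | zero => intro l cur acc; simp [PySem.Chars.splitOn.go]
  | succ fuel ih =>
    intro l cur acc
    cases l with
    | nil => simp [PySem.Chars.splitOn.go]
    | cons c rest =>
      by_cases hp : sep.isPrefixOf (c :: rest) = true
      · simp only [PySem.Chars.splitOn.go, hp, if_pos]; exact ih _ _ _
      · simp only [PySem.Chars.splitOn.go]
        rw [if_neg (by simp_all)]
        exact ih _ _ _

theorem splitOn_ne_nil (s sep : List Char) : PySem.Chars.splitOn s sep ≠ [] := by
  unfold PySem.Chars.splitOn; exact splitOn_go_ne_nil _ _ _ _ _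

-- every partial join '.'.join(parts[:i+1]) is the key itself or a dotted ancestor of it
theorem partial_join_char (k : List Char) (i : Nat)
    (_hi : i < (PySem.Chars.splitOn k ['.']).length) :
    PySem.Chars.join ['.'] ((PySem.Chars.splitOn k ['.']).take (i + 1)) = k ∨
    PySem.Chars.join ['.'] ((PySem.Chars.splitOn k ['.']).take (i + 1)) ++ ['.'] <+: k := by
  set parts := PySem.Chars.splitOn k ['.'] with hparts
  by_cases hlast : parts.length ≤ i + 1
  · left
    rw [List.take_of_length_le hlast, hparts, join_splitOn _ _]
  · right
    have hdrop : parts.drop (i + 1) ≠ [] := by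
      simp [List.drop_eq_nil_iff]; omega
    have htake : parts.take (i + 1) ≠ [] := by
      intro h
      rcases List.take_eq_nil_iff.mp h with h' | h'
      · exact absurd h' (by omega)
      · exact splitOn_ne_nil k ['.'] (by rw [← hparts]; exact h')
    have hk : k = PySem.Chars.join ['.'] parts := by
      rw [hparts, join_splitOn _ _]
    refine ⟨PySem.Chars.join ['.'] (parts.drop (i + 1)), ?_⟩
    rw [hk]
    conv_rhs => rw [← List.take_append_drop (i + 1) parts]
    rw [join_append ['.'] _ _ htake hdrop]

-- characterization of A: the if-chain is the disjunction of its four scans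
theorem A_iff (key : String) (references : List String) :
    is_value_referenced key references = true ↔
      ((∃ r ∈ references, r.toList = key.toList) ∨
       (∃ i < (PySem.Chars.splitOn key.toList ['.']).length, ∃ r ∈ references,
          r.toList = PySem.Chars.join ['.'] ((PySem.Chars.splitOn key.toList ['.']).take (i + 1))) ∨
       (∃ r ∈ references, PySem.Chars.startswith r.toList (key.toList ++ ['.']) = true) ∨
       (∃ r ∈ references, PySem.Chars.startswith key.toList (r.toList ++ ['.']) = true)) := by
  simp only [is_value_referenced]
  split_ifs with h1 h2 h3 h4
  · simp only [true_iff]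
    exact Or.inl (by simpa using h1)
  · simp only [true_iff]
    exact Or.inr (Or.inl (by simpa [List.any_eq_true, List.mem_range] using h2))
  · simp only [true_iff]
    exact Or.inr (Or.inr (Or.inl (by simpa [List.any_eq_true] using h3)))
  · simp only [true_iff]
    exact Or.inr (Or.inr (Or.inr (by simpa [List.any_eq_true] using h4)))
  · simp only [false_iff]
    rintro (h | h | h | h)
    · exact h1 (by simpa using h)
    · exact h2 (by simpa [List.any_eq_true, List.mem_range] using h)
    · exact h3 (by simpa [List.any_eq_true] using h)
    · exact h4 (by simpa [List.any_eq_true] using h)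

-- characterization of B: one scan, three tests per reference
theorem B_iff (key : String) (references : List String) :
    is_value_referenced_alt key references = true ↔
      ∃ r ∈ references, r.toList = key.toList ∨
        PySem.Chars.startswith key.toList (r.toList ++ ['.']) = true ∨
        PySem.Chars.startswith r.toList (key.toList ++ ['.']) = true := by
  simp [is_value_referenced_alt, List.any_eq_true, or_assoc]

-- ===== VERDICT (by name: the statement is the Claim_ definition above) =====
theorem is_value_referenced_spec : Claim_equal_is_value_referenced := by
  intro key references _
  unfold Spec_is_value_referenced
  rw [Bool.eq_iff_iff, A_iff, B_iff]
  constructor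
  · rintro (⟨r, hr, h⟩ | ⟨i, hi, r, hr, h⟩ | ⟨r, hr, h⟩ | ⟨r, hr, h⟩)
    · exact ⟨r, hr, Or.inl h⟩
    · rcases partial_join_char key.toList i hi with hp | hp
      · exact ⟨r, hr, Or.inl (by rw [h, hp])⟩
      · refine ⟨r, hr, Or.inr (Or.inl ?_)⟩
        rw [h, (PySem.Chars.startswith_iff _ _)]
        exact hp
    · exact ⟨r, hr, Or.inr (Or.inr h)⟩
    · exact ⟨r, hr, Or.inr (Or.inl h)⟩
  · rintro ⟨r, hr, h | h | h⟩
    · exact Or.inl ⟨r, hr, h⟩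
    · exact Or.inr (Or.inr (Or.inr ⟨r, hr, h⟩))
    · exact Or.inr (Or.inr (Or.inl ⟨r, hr, h⟩))
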